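-- pv_equiv track=rewrite | github.com/DiegoAF10/elclub | erp/scripts/ensure-primary-fan-short.py | pick_primary_idx
-- ===== SOURCE A (Python) =====
-- PRIORITY = [
--     ("fan_adult", "short"),
--     ("player_adult", "short"),
--     ("retro_adult", "short"),
--     ("fan_adult", "long"),
--     ("player_adult", "long"),
--     ("retro_adult", "long"),
--     ("woman", "short"),
--     ("woman", "long"),
--     ("kid", "short"),
--     ("kid", "long"),
--     ("baby", "short"),
-- ]
--
-- def pick_primary_idx(modelos):
--     """Retorna el idx del modelo que debe ser primary según PRIORITY. Si ninguno
--     matchea exactamente, retorna 0 (fallback)."""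
--     if not modelos:
--         return None
--     for target_type, target_sleeve in PRIORITY:
--         for i, m in enumerate(modelos):
--             if m.get("type") == target_type and m.get("sleeve") == target_sleeve:
--                 return i
--     return 0
-- ===== SOURCE B (Python) =====
-- PRIORITY = [
--     ("fan_adult", "short"),
--     ("player_adult", "short"),
--     ("retro_adult", "short"),
--     ("fan_adult", "long"),
--     ("player_adult", "long"),
--     ("retro_adult", "long"),
--     ("woman", "short"),
--     ("woman", "long"),
--     ("kid", "short"),
--     ("kid", "long"),
--     ("baby", "short"),
-- ]
--
-- def pick_primary_idx(modelos):
--     """Single pass over modelos keeping a running argmin: compute each model's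
--     priority rank and keep the first model with the smallest rank; fallback 0."""
--     if not modelos:
--         return None
--     best_i, best_r = 0, len(PRIORITY)
--     for i, m in enumerate(modelos):
--         key = (m.get("type"), m.get("sleeve"))
--         r = next((j for j, pk in enumerate(PRIORITY) if pk == key), None)
--         if r is not None and r < best_r:
--             best_i, best_r = i, r
--     return best_i
-- ===== Notes on version B (the rewrite author's own statement) =====
-- stated objective: alternative
-- what changed: Swaps the loop nesting: instead of rescanning modelos once per PRIORITY entry and returning at the first hit, B makes a single pass over modelos computing each model's priority rank and maintaining a running argmin (first model with the smallest rank, sentinel len(PRIORITY), fallback index 0).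
import Mathlib
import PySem

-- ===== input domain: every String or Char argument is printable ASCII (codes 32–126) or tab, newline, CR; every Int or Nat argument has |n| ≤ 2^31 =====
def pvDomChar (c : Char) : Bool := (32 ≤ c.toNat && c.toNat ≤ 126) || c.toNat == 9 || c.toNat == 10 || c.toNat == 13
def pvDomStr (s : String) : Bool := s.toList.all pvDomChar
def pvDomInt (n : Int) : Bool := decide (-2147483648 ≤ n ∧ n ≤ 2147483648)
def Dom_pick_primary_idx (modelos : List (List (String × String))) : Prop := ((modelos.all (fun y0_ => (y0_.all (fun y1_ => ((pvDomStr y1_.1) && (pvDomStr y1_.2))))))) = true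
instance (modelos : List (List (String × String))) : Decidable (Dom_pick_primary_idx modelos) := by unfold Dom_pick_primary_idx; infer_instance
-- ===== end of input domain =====

-- B swaps the loop nesting of A: a single pass over modelos computing each model's priority rank and keeping a running argmin, instead of A's rescan of modelos per PRIORITY entry (objective: alternative).

def PRIORITY : List (String × String) :=
  [("fan_adult", "short"), ("player_adult", "short"), ("retro_adult", "short"),
   ("fan_adult", "long"), ("player_adult", "long"), ("retro_adult", "long"),
   ("woman", "short"), ("woman", "long"), ("kid", "short"), ("kid", "long"),
   ("baby", "short")]

-- m.get(k): Python dict .get on the association list (first match, none when missing)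
def pvGet (m : List (String × String)) (k : String) : Option String :=
  (PySem.Dict.mk m).get? k

-- the tuple (m.get("type"), m.get("sleeve"))
def pvKey (m : List (String × String)) : Option String × Option String :=
  (pvGet m "type", pvGet m "sleeve")

-- ===== PORT A =====
-- inner loop: 'for i, m in enumerate(modelos): if m.get("type") == t and m.get("sleeve") == s: return i'
def pvScanA (t s : String) : List (List (String × String)) → Int → Option Int
  | [], _ => none
  | m :: rest, i =>
      if pvGet m "type" = some t ∧ pvGet m "sleeve" = some s then some i
      else pvScanA t s rest (i + 1)

-- outer loop: 'for target_type, target_sleeve in PRIORITY: …' with final 'return 0'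
def pvLoopA (modelos : List (List (String × String))) : List (String × String) → Option Int
  | [] => some 0
  | (t, s) :: rest =>
      match pvScanA t s modelos 0 with
      | some i => some i
      | none => pvLoopA modelos rest

def pick_primary_idx (modelos : List (List (String × String))) : Option Int :=
  if modelos = [] then none
  else pvLoopA modelos PRIORITY

-- ===== PORT B =====
-- 'next((j for j, pk in enumerate(PRIORITY) if pk == key), None)': a (str,str) pair pk equals the
-- (Optional,Optional) key tuple exactly when both components are present and equal (exact lifting).
def pvRnk : List (String × String) → Int → (Option String × Option String) → Option Int
  | [], _, _ => none
  | p :: rest, j, k => if (some p.1, some p.2) = k then some j else pvRnk rest (j + 1) k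

-- 'for i, m in enumerate(modelos): key = …; r = …; if r is not None and r < best_r: best_i, best_r = i, r'
-- (parametric in the priority list P; B runs it with P = PRIORITY)
def pvFoldB (P : List (String × String)) : List (List (String × String)) → Int → Int → Int → Int
  | [], _, bi, _ => bi
  | m :: rest, i, bi, br =>
      match pvRnk P 0 (pvKey m) with
      | some r => if r < br then pvFoldB P rest (i + 1) i r else pvFoldB P rest (i + 1) bi br
      | none => pvFoldB P rest (i + 1) bi br

def pick_primary_idx_alt (modelos : List (List (String × String))) : Option Int :=
  if modelos = [] then none
  else some (pvFoldB PRIORITY modelos 0 0 (PRIORITY.length : Int))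

-- ===== PRECONDITION & SPEC =====
def Spec_pick_primary_idx (modelos : List (List (String × String))) (out : Option Int) : Prop := out = pick_primary_idx_alt modelos
instance (modelos : List (List (String × String))) (out : Option Int) : Decidable (Spec_pick_primary_idx modelos out) := by unfold Spec_pick_primary_idx; infer_instance

-- ===== CLAIM (what is proved, stated in full; the proofs are below) =====
def Claim_equal_pick_primary_idx : Prop := ∀ (modelos : List (List (String × String))), Dom_pick_primary_idx modelos → Spec_pick_primary_idx modelos (pick_primary_idx modelos)

-- ===== LEMMAS AND PROOFS =====

-- A's inner scan rephrased on the key tuple (proof helper)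
def pvScanAK (k : Option String × Option String) : List (List (String × String)) → Int → Option Int
  | [], _ => none
  | m :: rest, i => if pvKey m = k then some i else pvScanAK k rest (i + 1)

-- A's inner scan with the key tuple as comparand
theorem pvScanA_eq_key (t s : String) :
    ∀ (L : List (List (String × String))) (i : Int),
      pvScanA t s L i = (pvScanAK (some t, some s) L i) := by
  intro L
  induction L with
  | nil => intro i; rfl
  | cons m rest ih =>
      intro i
      simp only [pvScanA, pvScanAK, pvKey, Prod.mk.injEq, ih]

-- rank values are bounded below by the starting offset
theorem pvRnk_ge : ∀ (P : List (String × String)) (a : Int) (k : Option String × Option String)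
    (r : Int), pvRnk P a k = some r → a ≤ r := by
  intro P
  induction P with
  | nil => intro a k r h; simp [pvRnk] at h
  | cons p rest ih =>
      intro a k r h
      unfold pvRnk at h
      split at h
      · injection h with h'; omega
      · exact le_trans (by omega) (ih (a + 1) k r h)

-- shifting the starting offset shifts every rank
theorem pvRnk_shift : ∀ (P : List (String × String)) (a : Int) (k : Option String × Option String),
    pvRnk P (a + 1) k = (pvRnk P a k).map (· + 1) := by
  intro P
  induction P with
  | nil => intro a k; rfl
  | cons p rest ih =>
      intro a k
      unfold pvRnk
      split
      · rfl
      · rw [ih]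

-- with an empty priority list the fold never updates
theorem pvFoldB_nil : ∀ (L : List (List (String × String))) (i bi br : Int),
    pvFoldB [] L i bi br = bi := by
  intro L
  induction L with
  | nil => intro i bi br; rfl
  | cons m rest ih => intro i bi br; simpa [pvFoldB, pvRnk] using ih (i + 1) bi br

-- once the best rank is 0 the fold never updates again (ranks are ≥ 0)
theorem pvFoldB_zero (P : List (String × String)) :
    ∀ (L : List (List (String × String))) (i bi : Int), pvFoldB P L i bi 0 = bi := by
  intro L
  induction L with
  | nil => intro i bi; rfl
  | cons m rest ih =>
      intro i bi
      unfold pvFoldB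
      cases h : pvRnk P 0 (pvKey m) with
      | none => exact ih (i + 1) bi
      | some r =>
          have := pvRnk_ge P 0 (pvKey m) r h
          dsimp only
          rw [if_neg (by omega)]
          exact ih (i + 1) bi

-- if the head priority's key never occurs, the fold over (p::Q) is the fold over Q with everything shifted by one
theorem pvFoldB_shift (p : String × String) (Q : List (String × String)) :
    ∀ (L : List (List (String × String))),
      (∀ m ∈ L, pvKey m ≠ (some p.1, some p.2)) →
      ∀ (i bi br : Int), pvFoldB (p :: Q) L i bi (br + 1) = pvFoldB Q L i bi br := by
  intro L
  induction L with
  | nil => intro _ i bi br; rfl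
  | cons m rest ih =>
      intro h i bi br
      have hm : pvKey m ≠ (some p.1, some p.2) := h m (List.mem_cons_self ..)
      have hrest : ∀ x ∈ rest, pvKey x ≠ (some p.1, some p.2) := fun x hx => h x (List.mem_cons_of_mem _ hx)
      unfold pvFoldB
      have hr : pvRnk (p :: Q) 0 (pvKey m) = (pvRnk Q 0 (pvKey m)).map (· + 1) := by
        have h1 : pvRnk (p :: Q) 0 (pvKey m) = pvRnk Q (0 + 1) (pvKey m) := by
          show (if (some p.1, some p.2) = pvKey m then some 0 else pvRnk Q (0 + 1) (pvKey m)) = _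
          rw [if_neg (fun he => hm he.symm)]
        rw [h1]
        exact pvRnk_shift Q 0 (pvKey m)
      rw [hr]
      cases hq : pvRnk Q 0 (pvKey m) with
      | none => simpa using ih hrest (i + 1) bi br
      | some r =>
          simp only [Option.map_some]
          by_cases hlt : r < br
          · rw [if_pos (by omega), if_pos hlt]
            exact ih hrest (i + 1) i r
          · rw [if_neg (by omega), if_neg hlt]
            exact ih hrest (i + 1) bi br

-- if the head priority's key occurs first at index i0, the fold over (p::Q) returns i0 (given best rank ≥ 1)
theorem pvFoldB_hit (p : String × String) (Q : List (String × String)) :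
    ∀ (L : List (List (String × String))) (j bi br i0 : Int), 1 ≤ br →
      pvScanAK (some p.1, some p.2) L j = some i0 →
      pvFoldB (p :: Q) L j bi br = i0 := by
  intro L
  induction L with
  | nil => intro j bi br i0 _ h; simp [pvScanAK] at h
  | cons m rest ih =>
      intro j bi br i0 hbr h
      unfold pvScanAK at h
      unfold pvFoldB
      by_cases hk : pvKey m = (some p.1, some p.2)
      · rw [if_pos hk] at h
        have hi : i0 = j := by injection h with h'; omega
        have hr : pvRnk (p :: Q) 0 (pvKey m) = some 0 := by
          unfold pvRnk; rw [if_pos hk.symm]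
        rw [hr]
        dsimp only
        rw [if_pos (by omega), pvFoldB_zero, hi]
      · rw [if_neg hk] at h
        cases hq : pvRnk (p :: Q) 0 (pvKey m) with
        | none => exact ih (j + 1) bi br i0 hbr h
        | some r =>
            have hr1 : 1 ≤ r := by
              unfold pvRnk at hq
              rw [if_neg (fun he => hk he.symm)] at hq
              have := pvRnk_ge Q 1 (pvKey m) r hq
              omega
            dsimp only
            by_cases hlt : r < br
            · rw [if_pos hlt]; exact ih (j + 1) j r i0 hr1 h
            · rw [if_neg hlt]; exact ih (j + 1) bi br i0 hbr h

-- scan returns none exactly when the key is absent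
theorem pvScanAK_none (k : Option String × Option String) :
    ∀ (L : List (List (String × String))) (j : Int),
      pvScanAK k L j = none → ∀ m ∈ L, pvKey m ≠ k := by
  intro L
  induction L with
  | nil => intro j _ m hm; cases hm
  | cons m rest ih =>
      intro j h x hx
      unfold pvScanAK at h
      split at h
      · cases h
      · rcases List.mem_cons.mp hx with rfl | hx'
        · assumption
        · exact ih (j + 1) h x hx'

-- main lemma: A's priority-major loop equals B's model-major argmin fold
theorem pvLoopA_eq_fold (modelos : List (List (String × String))) :
    ∀ (P : List (String × String)),
      pvLoopA modelos P = some (pvFoldB P modelos 0 0 (P.length : Int)) := by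
  intro P
  induction P with
  | nil => rw [pvLoopA, pvFoldB_nil]
  | cons p rest ih =>
      obtain ⟨t, s⟩ := p
      rw [pvLoopA, pvScanA_eq_key]
      cases hscan : pvScanAK (some t, some s) modelos 0 with
      | some i =>
          have := pvFoldB_hit (t, s) rest modelos 0 0 ((rest.length : Int) + 1) i (by omega) hscan
          simp only [List.length_cons]
          push_cast
          rw [this]
      | none =>
          have habs := pvScanAK_none (some t, some s) modelos 0 hscan
          simp only [List.length_cons]
          push_cast
          rw [pvFoldB_shift (t, s) rest modelos habs 0 0 (rest.length : Int), ih]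

-- ===== VERDICT (by name: the statement is the Claim_ definition above) =====
theorem pick_primary_idx_spec : Claim_equal_pick_primary_idx := by
  intro modelos _
  unfold Spec_pick_primary_idx pick_primary_idx pick_primary_idx_alt
  by_cases h : modelos = []
  · simp [h]
  · simp only [h, if_false, pvLoopA_eq_fold]
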